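-- pv_equiv track=rewrite | github.com/victorkjung/Airbnb-Multiple-Listings | AirBnbiCalCRM.py | tokenize_with_compounds
-- ===== SOURCE A (Python) =====
-- from typing import Optional, Dict, List, Tuple, Any
--
-- COMPOUND_TOKENS = {
--     ("hot", "tub"): "hottub",
--     ("fire", "pit"): "firepit",
-- }
--
-- def tokenize_with_compounds(text: str) -> List[str]:
--     tokens = text.split()
--     result = []
--     i = 0
--     while i < len(tokens):
--         if i + 1 < len(tokens):
--             pair = (tokens[i], tokens[i + 1])
--             if pair in COMPOUND_TOKENS:
--                 result.append(COMPOUND_TOKENS[pair])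
--                 i += 2
--                 continue
--         result.append(tokens[i])
--         i += 1
--     return result
-- ===== SOURCE B (Python) =====
-- from typing import List
--
-- COMPOUND_TOKENS = {
--     ("hot", "tub"): "hottub",
--     ("fire", "pit"): "firepit",
-- }
--
-- def tokenize_with_compounds(text: str) -> List[str]:
--     result = []
--     for tok in text.split():
--         result.append(tok)
--         if len(result) >= 2 and (result[-2], result[-1]) in COMPOUND_TOKENS:
--             merged = COMPOUND_TOKENS[(result[-2], result[-1])]
--             result.pop()
--             result.pop()
--             result.append(merged)
--     return result
-- ===== Notes on version B (the rewrite author's own statement) =====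
-- stated objective: alternative
-- what changed: A's index-jumping while loop with a look-ahead pair check is replaced by a plain single pass that appends each token to the output and then coalesces the last two output tokens when they form a known compound; this is safe because merged compound words never begin any compound key.
import Mathlib
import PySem

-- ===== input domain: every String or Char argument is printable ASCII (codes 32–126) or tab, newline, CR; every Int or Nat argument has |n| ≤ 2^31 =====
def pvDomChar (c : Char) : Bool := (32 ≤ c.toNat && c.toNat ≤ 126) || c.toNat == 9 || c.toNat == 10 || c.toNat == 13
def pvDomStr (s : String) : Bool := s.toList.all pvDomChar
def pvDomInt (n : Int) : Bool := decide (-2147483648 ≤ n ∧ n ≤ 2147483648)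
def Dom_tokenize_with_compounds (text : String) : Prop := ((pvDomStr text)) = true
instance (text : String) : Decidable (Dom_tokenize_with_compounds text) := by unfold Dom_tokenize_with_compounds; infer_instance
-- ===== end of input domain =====

-- B replaces A's look-ahead/index-jumping while loop by a single pass that appends each
-- token and coalesces the last two output tokens when they form a compound (objective: alternative).

-- ===== PORT A =====
def COMPOUND_TOKENS : PySem.Dict (String × String) String :=
  PySem.Dict.ofList [(("hot", "tub"), "hottub"), (("fire", "pit"), "firepit")]

-- A's while loop over index i: advancing i by 2 / 1 = structural recursion dropping 2 / 1 tokens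
def tokAWhile : List String → List String
  | t1 :: t2 :: rest =>
    match COMPOUND_TOKENS.get? (t1, t2) with
    | some m => m :: tokAWhile rest
    | none => t1 :: tokAWhile (t2 :: rest)
  | [t] => [t]
  | [] => []

def tokenize_with_compounds (text : String) : List String :=
  tokAWhile (PySem.Str.split₀ text)

-- ===== PORT B =====
-- one loop step: append tok, then merge the last two result tokens if they form a compound
def tokBStep (result : List String) (tok : String) : List String :=
  let result := result ++ [tok]
  match result.reverse with
  | t2 :: t1 :: _ =>
    match COMPOUND_TOKENS.get? (t1, t2) with
    | some m => result.dropLast.dropLast ++ [m]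
    | none => result
  | _ => result

def tokenize_with_compounds_alt (text : String) : List String :=
  (PySem.Str.split₀ text).foldl tokBStep []

-- ===== PRECONDITION & SPEC =====
def Spec_tokenize_with_compounds (text : String) (out : List String) : Prop := out = tokenize_with_compounds_alt text
instance (text : String) (out : List String) : Decidable (Spec_tokenize_with_compounds text out) := by unfold Spec_tokenize_with_compounds; infer_instance

-- ===== CLAIM (what is proved, stated in full; the proofs are below) =====
def Claim_equal_tokenize_with_compounds : Prop := ∀ (text : String), Dom_tokenize_with_compounds text → Spec_tokenize_with_compounds text (tokenize_with_compounds text)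

-- ===== LEMMAS AND PROOFS =====

-- close the literal dictionary: its lookup as an if-chain on the key
theorem get?_cases (a b : String) : COMPOUND_TOKENS.get? (a, b) =
    if a = "hot" ∧ b = "tub" then some "hottub"
    else if a = "fire" ∧ b = "pit" then some "firepit" else none := by
  have h : COMPOUND_TOKENS = PySem.Dict.mk [(("hot", "tub"), "hottub"), (("fire", "pit"), "firepit")] := by rfl
  rw [h, PySem.Dict.get?_mk_cons, PySem.Dict.get?_mk_cons]
  simp only [beq_iff_eq, Prod.mk.injEq]
  by_cases h1 : a = "hot" ∧ b = "tub"
  · obtain ⟨rfl, rfl⟩ := h1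
    simp
  · by_cases h2 : a = "fire" ∧ b = "pit"
    · obtain ⟨rfl, rfl⟩ := h2
      simp
    · rw [if_neg, if_neg, if_neg h2, if_neg h1]
      · rfl
      · intro hc; exact h2 ⟨hc.1.symm, hc.2.symm⟩
      · intro hc; exact h1 ⟨hc.1.symm, hc.2.symm⟩

-- no key of the dict starts with anything but "hot" or "fire"
theorem get?_none_of_fst {a b : String} (h1 : a ≠ "hot") (h2 : a ≠ "fire") :
    COMPOUND_TOKENS.get? (a, b) = none := by
  rw [get?_cases]
  rw [if_neg (fun hc => h1 hc.1), if_neg (fun hc => h2 hc.1)]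

-- every value of the dict is "hottub" or "firepit"
theorem get?_values {a b m : String} (h : COMPOUND_TOKENS.get? (a, b) = some m) :
    m = "hottub" ∨ m = "firepit" := by
  rw [get?_cases] at h
  split_ifs at h
  · exact Or.inl (Option.some.inj h).symm
  · exact Or.inr (Option.some.inj h).symm

-- unfold one B-step on a nonempty accumulator
theorem tokBStep_concat (res : List String) (t1 tok : String) :
    tokBStep (res ++ [t1]) tok =
      match COMPOUND_TOKENS.get? (t1, tok) with
      | some m => res ++ [m]
      | none => res ++ [t1, tok] := by
  have hrev : ((res ++ [t1]) ++ [tok]).reverse = tok :: t1 :: res.reverse := by simp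
  unfold tokBStep
  simp only [hrev]
  cases h : COMPOUND_TOKENS.get? (t1, tok) <;> simp

theorem tokBStep_nil (tok : String) : tokBStep [] tok = [tok] := by
  simp [tokBStep]

-- main loop invariant: when the accumulator's last token cannot merge with the next input
-- token, B's fold yields the accumulator followed by A's loop output
theorem fold_eq (ts : List String) :
    ∀ res : List String,
      (∀ t1 t2, res.getLast? = some t1 → ts.head? = some t2 →
        COMPOUND_TOKENS.get? (t1, t2) = none) →
      ts.foldl tokBStep res = res ++ tokAWhile ts := by
  induction ts using tokAWhile.induct with
  | case1 t1 t2 rest m hget ih =>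
    intro res hres
    have h1 : tokBStep res t1 = res ++ [t1] := by
      cases res using List.reverseRecOn with
      | nil => simp [tokBStep_nil]
      | append_singleton r l =>
        rw [tokBStep_concat, hres l t1 (by simp) (by simp)]
        simp
    have h2 : tokBStep (res ++ [t1]) t2 = res ++ [m] := by
      rw [tokBStep_concat, hget]
    have hm : ∀ t1' t2', (res ++ [m]).getLast? = some t1' → rest.head? = some t2' →
        COMPOUND_TOKENS.get? (t1', t2') = none := by
      intro t1' t2' hl _
      simp at hl
      subst hl
      rcases get?_values hget with h | h <;> subst h <;>
        exact get?_none_of_fst (by decide) (by decide)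
    rw [List.foldl_cons, h1, List.foldl_cons, h2, ih (res ++ [m]) hm]
    simp [tokAWhile, hget]
  | case2 t1 t2 rest hget ih =>
    intro res hres
    have h1 : tokBStep res t1 = res ++ [t1] := by
      cases res using List.reverseRecOn with
      | nil => simp [tokBStep_nil]
      | append_singleton r l =>
        rw [tokBStep_concat, hres l t1 (by simp) (by simp)]
        simp
    have hn : ∀ t1' t2', (res ++ [t1]).getLast? = some t1' → (t2 :: rest).head? = some t2' →
        COMPOUND_TOKENS.get? (t1', t2') = none := by
      intro t1' t2' hl hh
      simp at hl hh
      subst hl; subst hh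
      exact hget
    rw [List.foldl_cons, h1, ih (res ++ [t1]) hn]
    simp [tokAWhile, hget]
  | case3 t =>
    intro res hres
    have h1 : tokBStep res t = res ++ [t] := by
      cases res using List.reverseRecOn with
      | nil => simp [tokBStep_nil]
      | append_singleton r l =>
        rw [tokBStep_concat, hres l t (by simp) (by simp)]
        simp
    simp [h1, tokAWhile]
  | case4 =>
    intro res _
    simp [tokAWhile]

-- ===== VERDICT (by name: the statement is the Claim_ definition above) =====
theorem tokenize_with_compounds_spec : Claim_equal_tokenize_with_compounds := by
  intro text _
  unfold Spec_tokenize_with_compounds tokenize_with_compounds tokenize_with_compounds_alt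
  rw [fold_eq (PySem.Str.split₀ text) [] (by intro t1 t2 h _; simp at h)]
  simp
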